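-- pv_equiv track=rewrite | github.com/lukashavrlant/fca-search | src/preprocess/index_builder.py | groupByKeylen
-- ===== SOURCE A (Python) =====
-- def groupByKeylen(database, keylen):
-- 	dic = {}
-- 	for record in database:
-- 		key = record[0][0][:keylen]
-- 		if key in dic:
-- 			dic[key].append(record)
-- 		else:
-- 			dic[key] = [record]
-- 	return dic
-- ===== SOURCE B (Python) =====
-- def groupByKeylen(database, keylen):
-- 	def key(record):
-- 		return record[0][0][:keylen]
-- 	keys = dict.fromkeys(key(r) for r in database)
-- 	return {k: [r for r in database if key(r) == k] for k in keys}
-- ===== Notes on version B (the rewrite author's own statement) =====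
-- stated objective: alternative
-- what changed: Replaces the single-pass dict-of-growing-lists accumulator with a two-phase plan: first collect the distinct keys in first-occurrence order via dict.fromkeys, then build each group by filtering the database once per key.
import Mathlib
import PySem

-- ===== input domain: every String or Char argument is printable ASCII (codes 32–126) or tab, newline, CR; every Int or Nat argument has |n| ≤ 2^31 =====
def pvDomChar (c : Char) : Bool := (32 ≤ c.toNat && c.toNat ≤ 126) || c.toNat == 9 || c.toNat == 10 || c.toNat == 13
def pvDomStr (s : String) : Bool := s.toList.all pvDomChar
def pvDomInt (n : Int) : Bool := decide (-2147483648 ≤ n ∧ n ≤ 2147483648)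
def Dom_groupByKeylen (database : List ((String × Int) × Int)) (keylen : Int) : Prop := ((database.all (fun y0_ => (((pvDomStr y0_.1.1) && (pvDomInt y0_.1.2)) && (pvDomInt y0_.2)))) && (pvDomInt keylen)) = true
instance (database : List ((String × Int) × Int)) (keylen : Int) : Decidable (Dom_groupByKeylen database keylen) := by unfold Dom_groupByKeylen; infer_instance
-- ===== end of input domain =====

-- B builds the grouping in two phases (distinct keys in first-occurrence order, then one filter
-- per key) instead of A's single pass growing lists inside a dict; alternative decomposition, not faster.

-- ===== PORT A =====
-- for record in database: key = record[0][0][:keylen]; if key in dic: dic[key].append(record) else: dic[key] = [record]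
def groupByKeylen (database : List ((String × Int) × Int)) (keylen : Int) : List (String × List ((String × Int) × Int)) :=
  (database.foldl
    (fun dic record =>
      let key := PySem.Str.slice record.1.1 none (some keylen)
      if dic.contains key then
        dic.insert key (dic.getD key [] ++ [record])
      else
        dic.insert key [record])
    PySem.Dict.empty).items

-- ===== PORT B =====
-- keys = dict.fromkeys(key(r) for r in database); {k: [r for r in database if key(r) == k] for k in keys}
def groupByKeylen_alt (database : List ((String × Int) × Int)) (keylen : Int) : List (String × List ((String × Int) × Int)) :=
  let key := fun (record : (String × Int) × Int) => PySem.Str.slice record.1.1 none (some keylen)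
  let keys := PySem.List.dedup (database.map key)
  keys.map (fun k => (k, database.filter (fun r => key r == k)))

-- ===== PRECONDITION & SPEC =====
def Spec_groupByKeylen (database : List ((String × Int) × Int)) (keylen : Int) (out : List (String × List ((String × Int) × Int))) : Prop := out = groupByKeylen_alt database keylen
instance (database : List ((String × Int) × Int)) (keylen : Int) (out : List (String × List ((String × Int) × Int))) : Decidable (Spec_groupByKeylen database keylen out) := by unfold Spec_groupByKeylen; infer_instance

-- ===== CLAIM (what is proved, stated in full; the proofs are below) =====
def Claim_equal_groupByKeylen : Prop := ∀ (database : List ((String × Int) × Int)) (keylen : Int), Dom_groupByKeylen database keylen → Spec_groupByKeylen database keylen (groupByKeylen database keylen)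

-- ===== LEMMAS AND PROOFS =====

-- A's loop body (the if on `key in dic`) is exactly a Dict.modify appending the record.
theorem pv_step_eq_modify (keylen : Int) :
    (fun (dic : PySem.Dict String (List ((String × Int) × Int))) record =>
      let key := PySem.Str.slice record.1.1 none (some keylen)
      if dic.contains key then
        dic.insert key (dic.getD key [] ++ [record])
      else
        dic.insert key [record])
    = (fun dic record =>
        dic.modify (PySem.Str.slice record.1.1 none (some keylen)) [] (fun v => v ++ [record])) := by
  funext dic record
  simp only [PySem.Dict.modify]
  by_cases h : dic.contains (PySem.Str.slice record.1.1 none (some keylen))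
  · simp [h]
  · rw [PySem.Dict.getD_of_not_contains]
    · simp
    · simpa using h

theorem pv_ports_agree (database : List ((String × Int) × Int)) (keylen : Int) :
    groupByKeylen database keylen = groupByKeylen_alt database keylen := by
  unfold groupByKeylen groupByKeylen_alt
  rw [pv_step_eq_modify]
  have hmap :
      database.foldl
        (fun dic record =>
          dic.modify (PySem.Str.slice record.1.1 none (some keylen)) [] (fun v => v ++ [record]))
        PySem.Dict.empty
      = (database.map (fun r => (PySem.Str.slice r.1.1 none (some keylen), r))).foldl
          (fun dic p => dic.modify p.1 [] (fun v => v ++ [p.2])) PySem.Dict.empty := by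
    rw [List.foldl_map]
  rw [hmap]
  set l := database.map (fun r => (PySem.Str.slice r.1.1 none (some keylen), r)) with hl
  have hnodup : ((l.foldl (fun dic p => dic.modify p.1 [] (fun v => v ++ [p.2])) PySem.Dict.empty)).keys.Nodup := by
    exact PySem.Dict.nodup_keys_foldl_modify_key l (fun p => p.1) [] (fun d p v => v ++ [p.2]) _ (by simp)
  rw [PySem.Dict.items_eq_map_keys _ hnodup []]
  have hkeys :
      (l.foldl (fun dic p => dic.modify p.1 [] (fun v => v ++ [p.2])) PySem.Dict.empty).keys
      = PySem.List.dedup (database.map (fun r => PySem.Str.slice r.1.1 none (some keylen))) := by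
    rw [PySem.Dict.keys_foldl_modify_key l (fun p => p.1) [] (fun d p v => v ++ [p.2])]
    simp [hl, List.map_map, PySem.Set.update_nil_left, Function.comp_def]
  rw [hkeys]
  refine List.map_congr_left (fun k _ => ?_)
  rw [PySem.Dict.getD_foldl_modify_append]
  simp [hl, List.filter_map, List.map_map, Function.comp_def]

-- ===== VERDICT (by name: the statement is the Claim_ definition above) =====
theorem groupByKeylen_spec : Claim_equal_groupByKeylen := by
  intro database keylen _
  unfold Spec_groupByKeylen
  exact pv_ports_agree database keylen
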